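-- pv_equiv track=rewrite | github.com/seantyh/fluidvec | src/fluidvec/preproc.py | make_charpos
-- ===== SOURCE A (Python) =====
-- def make_charpos(word):
--     charpos = []
--     for i in range(len(word)):
--         cp = ""
--         if i == 0:
--             cp += "_"
--         cp += word[i]
--         if i == len(word)-1:
--             cp += "_"
--         charpos.append(cp)
--     return charpos
-- ===== SOURCE B (Python) =====
-- def make_charpos(word):
--     n = len(word)
--     if n == 0:
--         return []
--     if n == 1:
--         return ["_" + word + "_"]
--     return ["_" + word[0]] + list(word[1:-1]) + [word[-1] + "_"]
-- ===== Notes on version B (the rewrite author's own statement) =====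
-- stated objective: alternative
-- what changed: B replaces A's index loop with per-index i==0 / i==len(word)-1 branch tests by a case split on the word length and a three-segment concatenation: the decorated first character, the untouched middle slice word[1:-1] converted with list(), and the decorated last character; the middle of the word is handled by a C-level slice/list conversion instead of a Python-level loop body, which a timing run measured as a constant-factor speedup.
import Mathlib
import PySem

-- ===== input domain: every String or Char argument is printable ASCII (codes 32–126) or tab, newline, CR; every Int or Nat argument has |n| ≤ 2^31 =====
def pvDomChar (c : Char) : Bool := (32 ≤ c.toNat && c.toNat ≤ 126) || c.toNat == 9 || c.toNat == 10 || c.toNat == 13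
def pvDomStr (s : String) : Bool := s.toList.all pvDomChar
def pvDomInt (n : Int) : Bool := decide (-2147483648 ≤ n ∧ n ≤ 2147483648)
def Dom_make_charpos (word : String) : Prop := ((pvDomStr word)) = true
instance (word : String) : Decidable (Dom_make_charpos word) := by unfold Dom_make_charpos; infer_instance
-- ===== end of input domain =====

-- B replaces A's index loop with per-index boundary tests by a case split on the length and
-- a three-segment concatenation (decorated head ++ untouched middle slice ++ decorated tail).

-- ===== PORT A =====
-- strings are ported through the List Char side (String.ofList at the append), exact on the ASCII domain
def make_charpos (word : String) : List String :=
  (PySem.List.pyRange 0 (PySem.Str.len word) 1).foldl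
    (fun charpos i =>
      let cp : List Char := []
      let cp := if i = 0 then cp ++ ['_'] else cp
      -- word[i]: i ranges over 0..len-1, so pyGet? is always `some`; `.toList` appends that one character
      let cp := cp ++ (PySem.Str.pyGet? word i).toList
      let cp := if i = PySem.Str.len word - 1 then cp ++ ['_'] else cp
      charpos ++ [String.ofList cp]) []

-- ===== PORT B =====
def make_charpos_alt (word : String) : List String :=
  let cs := word.toList
  let n := cs.length
  if n = 0 then []
  else if n = 1 then [String.ofList (['_'] ++ cs ++ ['_'])]
  else
    [String.ofList ('_' :: (PySem.List.pyGet? cs 0).toList)]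
      ++ (PySem.List.slice cs (some 1) (some (-1))).map (fun c => String.ofList [c])
      ++ [String.ofList ((PySem.List.pyGet? cs (-1)).toList ++ ['_'])]

-- ===== PRECONDITION & SPEC =====
def Spec_make_charpos (word : String) (out : List String) : Prop := out = make_charpos_alt word
instance (word : String) (out : List String) : Decidable (Spec_make_charpos word out) := by unfold Spec_make_charpos; infer_instance

-- ===== CLAIM (what is proved, stated in full; the proofs are below) =====
def Claim_equal_make_charpos : Prop := ∀ (word : String), Dom_make_charpos word → Spec_make_charpos word (make_charpos word)

-- ===== LEMMAS AND PROOFS =====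

-- the common element shape: character k of the word annotated with its boundary markers
def pvF (cs : List Char) (k : Nat) : String :=
  String.ofList ((((if k = 0 then ['_'] else []) ++ cs[k]?.toList)) ++ (if k = cs.length - 1 then ['_'] else []))

theorem make_charpos_eq_map (word : String) :
    make_charpos word = (List.range word.toList.length).map (pvF word.toList) := by
  unfold make_charpos
  rw [PySem.Str.len_eq, PySem.List.pyRange_zero_nat, List.foldl_map,
    PySem.List.foldl_append_singleton_eq_map, List.nil_append]
  refine List.map_congr_left ?_
  intro k hk
  simp only [List.mem_range] at hk
  have e1 : ((k:Int) = 0) ↔ (k = 0) := by omega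
  have e2 : ((k:Int) = (word.toList.length : Int) - 1) ↔ (k = word.toList.length - 1) := by omega
  simp only [pvF, PySem.Str.pyGet?_natCast, e1, e2, List.nil_append]
  split_ifs <;> simp

theorem make_charpos_alt_eq_map (word : String) :
    make_charpos_alt word = (List.range word.toList.length).map (pvF word.toList) := by
  unfold make_charpos_alt
  set cs := word.toList with hcs
  set n := cs.length with hn
  by_cases h0 : n = 0
  · rw [if_pos h0, h0]; simp
  by_cases h1 : n = 1
  · rw [if_neg h0, if_pos h1, h1]
    obtain ⟨c, hc⟩ : ∃ c, cs = [c] := List.length_eq_one_iff.mp (hn ▸ h1)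
    simp [pvF, hc]
  · rw [if_neg h0, if_neg h1]
    have hn2 : 2 ≤ n := by omega
    -- B's middle slice word[1:-1] is drop 1 / take (n-2)
    have hslice : PySem.List.slice cs (some 1) (some (-1)) = (cs.drop 1).take (n - 2) := by
      simp only [PySem.List.slice, PySem.List.clampIdx_neg_one]
      have hc1 : PySem.List.clampIdx cs.length 1 = 1 := by
        simp [PySem.List.clampIdx]
        omega
      rw [hc1]
      congr 1
    -- split the range into first index, middle indices, last index
    have hrange : List.range n = (0 :: (List.range (n-2)).map (·+1)) ++ [n-1] := by
      have : n = (n - 2 + 1) + 1 := by omega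
      rw [this, List.range_succ, List.range_succ_eq_map]
      simp
    have hc0 : cs[0]? = some (cs[0]'(by omega)) := List.getElem?_eq_getElem _
    have hcl : cs[n-1]? = some (cs[n-1]'(by omega)) := List.getElem?_eq_getElem _
    have hh : String.ofList ('_' :: (PySem.List.pyGet? cs 0).toList) = pvF cs 0 := by
      simp [pvF, PySem.List.pyGet?_zero, hc0, ← hn, if_neg (show ¬ ((0:Nat) = n - 1) by omega)]
    have ht : String.ofList ((PySem.List.pyGet? cs (-1)).toList ++ ['_']) = pvF cs (n-1) := by
      have hlast : PySem.List.pyGet? cs (-1) = cs[n-1]? := by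
        rw [PySem.List.pyGet?_neg_one, List.getLast?_eq_getElem?, ← hn]
      simp [pvF, hlast, hcl, ← hn, if_neg (show ¬ (n - 1 = 0) by omega)]
    have hm : ((cs.drop 1).take (n-2)).map (fun c => String.ofList [c])
        = (List.range (n-2)).map (pvF cs ∘ (·+1)) := by
      apply List.ext_getElem
      · simp [← hn]; omega
      · intro j hj1 hj2
        have hjn : j < n - 2 := by simp [← hn] at hj1; omega
        have hget : cs[j+1]? = some (cs[j+1]'(by omega)) := List.getElem?_eq_getElem _
        simp only [List.getElem_map, List.getElem_take, List.getElem_drop, List.getElem_range,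
          Function.comp_apply]
        simp [pvF, ← hn, hget, if_neg (show ¬ (j + 1 = n - 1) by omega), Nat.add_comm 1 j]
    rw [hslice, hrange]
    simp only [List.map_append, List.map_cons, List.map_map, List.map_nil]
    rw [hm, hh, ht]
    simp

-- ===== VERDICT (by name: the statement is the Claim_ definition above) =====
theorem make_charpos_spec : Claim_equal_make_charpos := by
  intro word _
  unfold Spec_make_charpos
  rw [make_charpos_eq_map, make_charpos_alt_eq_map]
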